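-- pv_equiv track=rewrite | github.com/ricardodelimaribeiro/MFGraphs | Scripts/GeneratePaperTables.py | format_counts
-- ===== SOURCE A (Python) =====
-- from typing import Dict, List, Optional
--
-- STATUS_ORDER = ["OK", "TIMEOUT", "FAILED", "SKIPPED", "UNKNOWN"]
--
-- def format_counts(counts: Optional[Dict[str, int]]) -> str:
--     if counts is None:
--         return "—"
--     parts: List[str] = []
--     seen = set()
--     for status in STATUS_ORDER:
--         if counts.get(status, 0) > 0:
--             parts.append(f"{counts[status]} {status}")
--             seen.add(status)
--     for status in sorted(counts.keys()):
--         if status not in seen and counts.get(status, 0) > 0: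
--             parts.append(f"{counts[status]} {status}")
--     return ", ".join(parts) if parts else "0"
-- ===== SOURCE B (Python) =====
-- from typing import Dict, List, Optional
--
-- STATUS_ORDER = ["OK", "TIMEOUT", "FAILED", "SKIPPED", "UNKNOWN"]
--
-- def format_counts(counts: Optional[Dict[str, int]]) -> str:
--     if counts is None:
--         return "—"
--     rank = {s: i for i, s in enumerate(STATUS_ORDER)}
--     n = len(STATUS_ORDER)
--     keys = sorted((k for k in counts if counts[k] > 0),
--                   key=lambda s: (rank.get(s, n), "" if s in rank else s))
--     parts = [f"{counts[k]} {k}" for k in keys]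
--     return ", ".join(parts) if parts else "0"
-- ===== Notes on version B (the rewrite author's own statement) =====
-- stated objective: alternative
-- what changed: B replaces A's two staged emission loops with seen-set bookkeeping by one composite-key sort: it ranks each status via an enumerate-built index table and sorts the positive keys once by (rank-or-len, tie string), then formats in a single pass.
import Mathlib
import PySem

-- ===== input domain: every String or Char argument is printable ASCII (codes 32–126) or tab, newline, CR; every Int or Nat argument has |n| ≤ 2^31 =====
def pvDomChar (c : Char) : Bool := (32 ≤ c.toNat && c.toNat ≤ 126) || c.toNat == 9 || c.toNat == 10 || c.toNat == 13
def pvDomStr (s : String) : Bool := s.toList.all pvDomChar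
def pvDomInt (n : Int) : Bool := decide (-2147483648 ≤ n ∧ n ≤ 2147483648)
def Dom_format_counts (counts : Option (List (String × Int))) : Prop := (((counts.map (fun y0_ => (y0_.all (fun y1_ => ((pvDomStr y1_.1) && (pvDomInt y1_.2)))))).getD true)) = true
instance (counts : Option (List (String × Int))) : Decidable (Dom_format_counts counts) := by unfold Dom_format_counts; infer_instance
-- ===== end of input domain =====

-- B replaces A's two staged emission loops (fixed statuses, then sorted leftovers
-- guarded by a seen-set) with ONE composite-key sort of the positive keys,
-- ranked through an enumerate-built index table: alternative decomposition.

-- shared context: the module constant and the f-string f"{counts[k]} {k}"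
def STATUS_ORDER : List String := ["OK", "TIMEOUT", "FAILED", "SKIPPED", "UNKNOWN"]

def pvFmt (d : PySem.Dict String Int) (k : String) : String :=
  PySem.Str.join " " [PySem.Int.toStr (d.getD k 0), k]
  -- counts[k]: in both programs this lookup is guarded (counts.get(k,0) > 0 resp.
  -- counts[k] > 0 for k in counts), so the key is present and getD is exact there

-- ===== PORT A =====
def format_counts (counts : Option (List (String × Int))) : String :=
  match counts with
  | none => "—"
  | some l =>
    let d := PySem.Dict.ofList l
    let ps := STATUS_ORDER.foldl
      (fun (acc : List String × PySem.Set String) status =>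
        if d.getD status 0 > 0 then (acc.1 ++ [pvFmt d status], acc.2.add status)
        else acc)
      ([], PySem.Set.empty)
    let parts := (PySem.List.sorted d.keys (fun x => x) false).foldl
      (fun acc status =>
        if !(PySem.Set.contains ps.2 status) && d.getD status 0 > 0 then acc ++ [pvFmt d status]
        else acc)
      ps.1
    if parts ≠ [] then PySem.Str.join ", " parts else "0"

-- ===== PORT B =====
-- rank = {s: i for i, s in enumerate(STATUS_ORDER)}
def pvRank : PySem.Dict String Int :=
  (PySem.List.enumerate STATUS_ORDER).foldl
    (fun acc p => acc.insert p.2 p.1) PySem.Dict.empty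

def format_counts_alt (counts : Option (List (String × Int))) : String :=
  match counts with
  | none => "—"
  | some l =>
    let d := PySem.Dict.ofList l
    let n : Int := (STATUS_ORDER.length : Int)
    let keys := PySem.List.sorted2 (d.keys.filter (fun k => d.getD k 0 > 0))
      (fun s => pvRank.getD s n)
      (fun s => if pvRank.contains s then "" else s) false
    let parts := keys.map (pvFmt d)
    if parts.isEmpty then "0" else PySem.Str.join ", " parts

-- ===== PRECONDITION & SPEC =====
def Spec_format_counts (counts : Option (List (String × Int))) (out : String) : Prop := out = format_counts_alt counts
instance (counts : Option (List (String × Int))) (out : String) : Decidable (Spec_format_counts counts out) := by unfold Spec_format_counts; infer_instance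

-- ===== CLAIM (what is proved, stated in full; the proofs are below) =====
def Claim_equal_format_counts : Prop := ∀ (counts : Option (List (String × Int))), Dom_format_counts counts → Spec_format_counts counts (format_counts counts)

-- ===== LEMMAS AND PROOFS =====

-- B's composite key, as one lex-ordered key
def pvKey (s : String) : Int ×ₗ String :=
  toLex (pvRank.getD s (STATUS_ORDER.length : Int), if pvRank.contains s then "" else s)

theorem pvSorted2_eq_sorted_lex (xs : List String) :
    PySem.List.sorted2 xs (fun s => pvRank.getD s (STATUS_ORDER.length : Int))
      (fun s => if pvRank.contains s then "" else s) false
    = PySem.List.sorted xs pvKey false := by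
  rw [PySem.List.sorted_eq_foldl_insertBy]
  simp only [PySem.List.sorted2, Bool.false_eq_true, if_false]
  congr 1
  funext acc x
  congr 1
  funext a b
  rw [Bool.eq_iff_iff]
  simp only [Bool.or_eq_true, Bool.and_eq_true, Bool.not_eq_true', decide_eq_true_eq,
    decide_eq_false_iff_not, pvKey, Prod.Lex.toLex_lt_toLex]
  constructor
  · rintro (h | ⟨h1, h2⟩)
    · exact Or.inl h
    · rcases lt_or_eq_of_le (not_lt.mp h1) with h | h
      · exact Or.inl h
      · exact Or.inr ⟨h, h2⟩
  · rintro (h | ⟨h1, h2⟩)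
    · exact Or.inl h
    · exact Or.inr ⟨by omega, h2⟩

-- key facts about the rank table
theorem pvKey_of_mem (s : String) (h : s ∈ STATUS_ORDER) :
    pvRank.getD s (STATUS_ORDER.length : Int) < 5 ∧ pvRank.contains s = true := by
  fin_cases h <;> exact ⟨by decide, by decide⟩

theorem pvKey_of_not_mem (s : String) (h : s ∉ STATUS_ORDER) :
    pvRank.getD s (STATUS_ORDER.length : Int) = 5 ∧ pvRank.contains s = false := by
  simp only [STATUS_ORDER, List.mem_cons, List.not_mem_nil, or_false, not_or] at h
  obtain ⟨h1, h2, h3, h4, h5⟩ := h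
  constructor <;>
    simp [pvRank, PySem.Dict.getD, PySem.Dict.get?, PySem.Dict.contains, STATUS_ORDER,
      PySem.List.enumerate, PySem.Dict.insert, PySem.Dict.empty,
      Ne.symm h1, Ne.symm h2, Ne.symm h3, Ne.symm h4, Ne.symm h5]

-- A's first loop: parts collects the formatted positive fixed statuses, seen collects them as a set
theorem pvFirstLoop (d : PySem.Dict String Int) (sts : List String)
    (parts : List String) (seen : PySem.Set String) :
    sts.foldl
      (fun (acc : List String × PySem.Set String) status =>
        if d.getD status 0 > 0 then (acc.1 ++ [pvFmt d status], acc.2.add status)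
        else acc)
      (parts, seen)
    = (parts ++ (sts.filter (fun s => d.getD s 0 > 0)).map (pvFmt d),
       PySem.Set.update seen (sts.filter (fun s => d.getD s 0 > 0))) := by
  induction sts generalizing parts seen with
  | nil => simp [PySem.Set.update]
  | cons x t ih =>
    by_cases h : d.getD x 0 > 0 <;>
      simp [List.foldl_cons, h, ih, PySem.Set.update, List.append_assoc]

-- splitting a filter along a second predicate, up to permutation
theorem pvFilterSplit {α : Type} (l : List α) (p q : α → Bool) :
    (l.filter (fun x => p x && q x) ++ l.filter (fun x => p x && !q x)).Perm (l.filter p) := by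
  induction l with
  | nil => simp
  | cons x t ih =>
    by_cases hp : p x
    · by_cases hq : q x
      · simpa [hp, hq] using ih.cons x
      · simp only [List.filter_cons, hp, hq]
        simpa using (List.perm_middle.trans (ih.cons x))
    · simpa [hp] using ih

theorem format_counts_spec' (counts : Option (List (String × Int))) :
    format_counts counts = format_counts_alt counts := by
  cases counts with
  | none => rfl
  | some l =>
    simp only [format_counts, format_counts_alt]
    set d := PySem.Dict.ofList l with hd
    have hnd : d.keys.Nodup := PySem.Dict.nodup_keys_ofList l
    rw [pvFirstLoop, PySem.List.foldl_append_if, pvSorted2_eq_sorted_lex]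
    -- membership in seen
    have hseen : ∀ k : String,
        (PySem.Set.contains (PySem.Set.update PySem.Set.empty
            (STATUS_ORDER.filter (fun s => d.getD s 0 > 0))) k)
        = (STATUS_ORDER.contains k && decide (d.getD k 0 > 0)) := by
      intro k
      rw [Bool.eq_iff_iff]
      simp [PySem.Set.update, ← PySem.Set.ofList_eq_foldl,
        PySem.Set.mem_ofList, List.mem_filter, List.contains_eq_mem]
    -- the second-loop filter is: not a fixed status, and positive
    have hq : ∀ k : String,
        (!(PySem.Set.contains (PySem.Set.update PySem.Set.empty
              (STATUS_ORDER.filter (fun s => d.getD s 0 > 0))) k)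
          && decide (d.getD k 0 > 0))
        = ((!STATUS_ORDER.contains k) && decide (d.getD k 0 > 0)) := by
      intro k
      rw [hseen]
      cases hp : decide (d.getD k 0 > 0) <;> cases hs : STATUS_ORDER.contains k <;> simp
    have hfilt : ((PySem.List.sorted d.keys (fun x => x) false).filter
          (fun status => (!(PySem.Set.contains (PySem.Set.update PySem.Set.empty
              (STATUS_ORDER.filter (fun s => d.getD s 0 > 0))) status)
            && decide (d.getD status 0 > 0))))
        = ((PySem.List.sorted d.keys (fun x => x) false).filter
          (fun k => (!STATUS_ORDER.contains k) && decide (d.getD k 0 > 0))) :=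
      List.filter_congr (fun k _ => hq k)
    rw [hfilt]
    set F := STATUS_ORDER.filter (fun s => d.getD s 0 > 0) with hF
    set E := (PySem.List.sorted d.keys (fun x => x) false).filter
      (fun k => (!STATUS_ORDER.contains k) && decide (d.getD k 0 > 0)) with hE
    -- B's sorted list is exactly F ++ E
    have hmemF : ∀ s ∈ F, s ∈ STATUS_ORDER ∧ d.getD s 0 > 0 := by
      intro s hs
      rw [hF, List.mem_filter] at hs
      exact ⟨hs.1, by simpa using hs.2⟩
    have hmemE : ∀ s ∈ E, s ∉ STATUS_ORDER ∧ d.getD s 0 > 0 := by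
      intro s hs
      rw [hE, List.mem_filter, PySem.List.mem_sorted] at hs
      have := hs.2
      simp only [Bool.and_eq_true, Bool.not_eq_true', decide_eq_true_eq] at this
      exact ⟨by simpa [List.contains_eq_mem] using this.1, this.2⟩
    have hkeys_of_pos : ∀ s : String, d.getD s 0 > 0 → s ∈ d.keys := by
      intro s hpos
      by_contra hc
      have hc2 : d.contains s = false := by
        rw [PySem.Dict.contains_eq_decide_mem_keys]
        simpa using hc
      rw [PySem.Dict.getD_of_not_contains d 0 hc2] at hpos
      omega
    have hsortnd : (PySem.List.sorted d.keys (fun x => x) false).Nodup :=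
      (PySem.List.sorted_perm d.keys (fun x => x) false).nodup_iff.mpr hnd
    have hsortlt : (PySem.List.sorted d.keys (fun x => x) false).Pairwise (· < ·) :=
      ((PySem.List.sorted_pairwise d.keys (fun x => x)).and hsortnd).imp
        (fun h => lt_of_le_of_ne h.1 h.2)
    have hperm : (F ++ E).Perm (d.keys.filter (fun k => d.getD k 0 > 0)) := by
      have h1 : F.Perm (d.keys.filter (fun k => decide (d.getD k 0 > 0) && STATUS_ORDER.contains k)) := by
        rw [List.perm_ext_iff_of_nodup (List.Nodup.filter _ (by decide))
          (List.Nodup.filter _ hnd)]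
        intro a
        simp only [List.mem_filter, Bool.and_eq_true, decide_eq_true_eq,
          List.contains_eq_mem]
        constructor
        · rintro ⟨h1, h2⟩
          exact ⟨hkeys_of_pos a (by simpa using h2), by simpa using h2, by simpa using h1⟩
        · rintro ⟨_, h1, h2⟩
          exact ⟨by simpa using h2, by simpa using h1⟩
      have h2 : E.Perm (d.keys.filter (fun k => decide (d.getD k 0 > 0) && !STATUS_ORDER.contains k)) := by
        rw [hE]
        refine ((PySem.List.sorted_perm d.keys (fun x => x) false).filter _).trans ?_
        have e : d.keys.filter (fun k => (!STATUS_ORDER.contains k) && decide (d.getD k 0 > 0))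
            = d.keys.filter (fun k => decide (d.getD k 0 > 0) && !STATUS_ORDER.contains k) :=
          List.filter_congr (fun a _ => Bool.and_comm _ _)
        rw [e]
      exact (h1.append h2).trans
        (pvFilterSplit d.keys (fun k => decide (d.getD k 0 > 0)) (fun k => STATUS_ORDER.contains k))
    have hpair : (F ++ E).Pairwise (fun a b => pvKey a < pvKey b) := by
      rw [List.pairwise_append]
      refine ⟨?_, ?_, ?_⟩
      · exact List.Pairwise.filter _
          (show STATUS_ORDER.Pairwise (fun a b => pvKey a < pvKey b) by decide)
      · refine hsortlt.filter _ |>.imp_of_mem ?_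
        intro a b ha hb hab
        have ha' := (hmemE a (by rwa [hE])).1
        have hb' := (hmemE b (by rwa [hE])).1
        obtain ⟨ha1, ha2⟩ := pvKey_of_not_mem a ha'
        obtain ⟨hb1, hb2⟩ := pvKey_of_not_mem b hb'
        simp only [pvKey, ha1, ha2, hb1, hb2, Bool.false_eq_true, if_false,
          Prod.Lex.toLex_lt_toLex]
        exact Or.inr ⟨trivial, hab⟩
      · intro a ha b hb
        obtain ⟨haS, _⟩ := hmemF a ha
        obtain ⟨hbS, _⟩ := hmemE b hb
        obtain ⟨ha1, _⟩ := pvKey_of_mem a haS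
        obtain ⟨hb1, _⟩ := pvKey_of_not_mem b hbS
        simp only [pvKey, Prod.Lex.toLex_lt_toLex]
        exact Or.inl (by rw [hb1]; exact ha1)
    have hB : PySem.List.sorted (d.keys.filter (fun k => d.getD k 0 > 0)) pvKey false = F ++ E :=
      PySem.List.sorted_eq_of_perm_of_pairwise_lt _ _ pvKey hperm hpair
    rw [hB, List.nil_append, ← List.map_append]
    cases hC : (F ++ E).map (pvFmt d) with
    | nil => simp
    | cons a t => simp

-- ===== VERDICT (by name: the statement is the Claim_ definition above) =====
theorem format_counts_spec : Claim_equal_format_counts := by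
  intro counts _
  exact format_counts_spec' counts
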